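-- pv_equiv track=rewrite | github.com/mohammadfaiizan/ProjectI | DSA/Problem/Dynamic Programming/10_Bitmask_DP/1434_Number_of_Ways_to_Wear_Different_Hats.py | number_of_ways_to_wear_hats_hat_bitmask
-- ===== SOURCE A (Python) =====
-- def number_of_ways_to_wear_hats_hat_bitmask(hats):
--     """
--     HAT-BASED BITMASK DP:
--     ====================
--     Use bitmask to track which hats have been used.
--
--     Time Complexity: O(n * 2^h) where h is number of distinct hats
--     Space Complexity: O(2^h) - DP table
--     """
--     MOD = 10**9 + 7
--     n = len(hats)
--
--     # Get all unique hats and create mapping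
--     all_hats = set()
--     for person_hats in hats:
--         all_hats.update(person_hats)
--     all_hats = sorted(all_hats)
--     hat_to_id = {hat: i for i, hat in enumerate(all_hats)}
--
--     # Convert to hat IDs
--     person_hat_masks = []
--     for person_hats in hats:
--         mask = 0
--         for hat in person_hats:
--             mask |= (1 << hat_to_id[hat])
--         person_hat_masks.append(mask)
--
--     num_hats = len(all_hats)
--     memo = {}
--
--     def dp(person_idx, used_hat_mask):
--         if person_idx == n:
--             return 1
--
--         if (person_idx, used_hat_mask) in memo:
--             return memo[(person_idx, used_hat_mask)]
--
--         result = 0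
--         person_mask = person_hat_masks[person_idx]
--
--         # Try each hat this person likes
--         for hat_id in range(num_hats):
--             if (person_mask & (1 << hat_id)) and not (used_hat_mask & (1 << hat_id)):
--                 new_used_mask = used_hat_mask | (1 << hat_id)
--                 result = (result + dp(person_idx + 1, new_used_mask)) % MOD
--
--         memo[(person_idx, used_hat_mask)] = result
--         return result
--
--     return dp(0, 0)
-- ===== SOURCE B (Python) =====
-- def number_of_ways_to_wear_hats_hat_bitmask(hats):
--     MOD = 10**9 + 7
--     n = len(hats)
--     wearers = {}
--     for i, person_hats in enumerate(hats):
--         for hat in person_hats: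
--             wearers[hat] = wearers.get(hat, 0) | (1 << i)
--     dp = [1] + [0] * ((1 << n) - 1)
--     for pmask in wearers.values():
--         dp = [(dp[m] + sum(dp[m ^ (1 << i)] for i in range(n)
--                            if (m >> i) & 1 and (pmask >> i) & 1)) % MOD
--               for m in range(1 << n)]
--     return dp[-1]
-- ===== Notes on version B (the rewrite author's own statement) =====
-- stated objective: faster
-- what changed: Replaces A's person-indexed memoized recursion over used-hat bitmasks (state space 2^h for h distinct hats) by a hat-indexed bottom-up DP over people bitmasks: one O(2^n * n) sweep per distinct hat, using a dict mapping each hat to the bitmask of people who like it.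
import Mathlib
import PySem

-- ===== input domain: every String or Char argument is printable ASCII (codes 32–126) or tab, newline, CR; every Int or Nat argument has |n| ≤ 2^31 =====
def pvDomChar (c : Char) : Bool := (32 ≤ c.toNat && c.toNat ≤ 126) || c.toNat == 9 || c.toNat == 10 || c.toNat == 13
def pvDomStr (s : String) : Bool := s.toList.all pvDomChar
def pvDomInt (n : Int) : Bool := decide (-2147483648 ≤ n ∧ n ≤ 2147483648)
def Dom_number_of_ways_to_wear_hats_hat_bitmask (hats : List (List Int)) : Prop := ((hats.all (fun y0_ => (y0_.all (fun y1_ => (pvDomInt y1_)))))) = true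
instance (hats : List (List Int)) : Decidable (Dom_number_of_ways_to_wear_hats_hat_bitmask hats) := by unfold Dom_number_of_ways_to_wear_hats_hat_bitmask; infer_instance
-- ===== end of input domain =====

-- B re-implements the count with a hat-indexed DP over people-bitmasks (O(h·2^n·n) instead of
-- A's person-indexed memoized recursion over hat-bitmasks); both return the count mod 10^9+7.

-- ===== PORT A =====
def pvMOD : Int := 1000000007   -- MOD = 10**9 + 7

-- A's inner `dp(person_idx, used_hat_mask)`: memoized recursion; the memo dict is threaded
-- through the hat loop explicitly.  Masks are Python ints that are always nonnegative here,
-- represented as Nat (exact); `person_mask & (1 << j)` truthiness is the j-th bit test.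
-- The `n ≤ i` guard is Python's `person_idx == n` (dp is only ever called with i ≤ n);
-- it only makes the recursion total.
def pvDpA (ms : List Nat) (n H : Nat) (i u : Nat) (memo : PySem.Dict (Nat × Nat) Int) :
    Int × PySem.Dict (Nat × Nat) Int :=
  if n ≤ i then (1, memo)
  else
    match memo.get? (i, u) with
    | some v => (v, memo)
    | none =>
      let pm := ms.getD i 0
      let r := (List.range H).foldl (fun (acc : Int × PySem.Dict (Nat × Nat) Int) j =>
          if pm.testBit j && !u.testBit j then
            let t := pvDpA ms n H (i+1) (u ||| (1 <<< j)) acc.2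
            ((acc.1 + t.1) % pvMOD, t.2)
          else acc) (0, memo)
      (r.1, r.2.insert (i, u) r.1)
termination_by n - i
decreasing_by omega

def number_of_ways_to_wear_hats_hat_bitmask (hats : List (List Int)) : Int :=
  let n := hats.length
  -- all_hats = set(); for person_hats in hats: all_hats.update(person_hats)
  let allHats : PySem.Set Int := hats.foldl (fun s ph => PySem.Set.update s ph) PySem.Set.empty
  -- all_hats = sorted(all_hats)
  let sortedHats := PySem.List.sorted allHats (fun x => x) false
  -- hat_to_id = {hat: i for i, hat in enumerate(all_hats)}
  let hatToId : PySem.Dict Int Int :=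
    (PySem.List.enumerate sortedHats).foldl (fun d p => d.insert p.2 p.1) PySem.Dict.empty
  -- person_hat_masks; hat_to_id[hat] never raises (every hat is a key); its value is ≥ 0 (toNat exact)
  let personHatMasks : List Nat :=
    hats.map (fun ph => ph.foldl (fun mask hat => mask ||| (1 <<< (hatToId.getD hat 0).toNat)) 0)
  let numHats := sortedHats.length
  (pvDpA personHatMasks n numHats 0 0 PySem.Dict.empty).1

-- ===== PORT B =====
-- wearers[hat] = bitmask of the people who like `hat`; then for each distinct hat a DP sweep
-- over all people-masks.  enumerate indices are ≥ 0 (toNat exact); all list indices are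
-- in range (dp always has length 2^n), so getD is exact; dp[-1] is pyGetD at -1.
def number_of_ways_to_wear_hats_hat_bitmask_alt (hats : List (List Int)) : Int :=
  let n := hats.length
  let wearers : PySem.Dict Int Nat :=
    (PySem.List.enumerate hats).foldl (fun w p =>
      p.2.foldl (fun (w : PySem.Dict Int Nat) hat =>
        w.insert hat (w.getD hat 0 ||| (1 <<< p.1.toNat))) w) PySem.Dict.empty
  let dp0 : List Int := 1 :: List.replicate (2 ^ n - 1) 0
  let dp := (PySem.Dict.values wearers).foldl (fun (dp : List Int) (pmask : Nat) =>
      (List.range (2 ^ n)).map (fun m =>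
        (dp.getD m 0 + (List.range n).foldl (fun s i =>
            if (m >>> i) &&& 1 = 1 ∧ (pmask >>> i) &&& 1 = 1 then s + dp.getD (m ^^^ (1 <<< i)) 0
            else s) 0) % pvMOD)) dp0
  PySem.List.pyGetD dp (-1) 0

-- ===== PRECONDITION & SPEC =====
def Spec_number_of_ways_to_wear_hats_hat_bitmask (hats : List (List Int)) (out : Int) : Prop := out = number_of_ways_to_wear_hats_hat_bitmask_alt hats
instance (hats : List (List Int)) (out : Int) : Decidable (Spec_number_of_ways_to_wear_hats_hat_bitmask hats out) := by unfold Spec_number_of_ways_to_wear_hats_hat_bitmask; infer_instance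

-- ===== CLAIM (what is proved, stated in full; the proofs are below) =====
def Claim_equal_number_of_ways_to_wear_hats_hat_bitmask : Prop := ∀ (hats : List (List Int)), Dom_number_of_ways_to_wear_hats_hat_bitmask hats → Spec_number_of_ways_to_wear_hats_hat_bitmask hats (number_of_ways_to_wear_hats_hat_bitmask hats)

-- ===== LEMMAS AND PROOFS =====

-- ---------- proof-side model ----------
-- `pvF n H R i m u` : number of ways to give the people i, i+1, …, n-1 whose bit is set in the
-- people-mask m pairwise different hats (hat ids < H, liking relation R, hats in the mask u
-- already taken).  This is A's recursion enriched with the people-mask m.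
def pvF (n H : Nat) (R : Nat → Nat → Bool) (i m u : Nat) : Nat :=
  if n ≤ i then 1
  else if !m.testBit i then pvF n H R (i+1) m u
  else ∑ j ∈ Finset.range H, if R i j && !u.testBit j then pvF n H R (i+1) m (u ||| 2 ^ j) else 0
termination_by n - i
decreasing_by all_goals omega

-- `pvM n P m` : B's recursion — number of ways to give every person in the people-mask m a hat,
-- with pairwise different hats drawn from the list P of people-masks (one entry per hat).
def pvM (n : Nat) : List Nat → Nat → Nat
  | [], m => if m = 0 then 1 else 0
  | p :: P, m => pvM n P m + ∑ i ∈ Finset.range n, if m.testBit i && p.testBit i then pvM n P (m ^^^ 2 ^ i) else 0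

-- A's liking relation, read off the person hat-masks
def pvR (ms : List Nat) (i j : Nat) : Bool := (ms.getD i 0).testBit j

-- the people-mask of hat j (column j of R)
def pvCol (n : Nat) (R : Nat → Nat → Bool) (j : Nat) : Nat :=
  (List.range n).foldl (fun a i => if R i j then a ||| 2 ^ i else a) 0

-- A's dp without the memo
def pvPureA (ms : List Nat) (n H : Nat) (i u : Nat) : Int :=
  if n ≤ i then 1
  else (List.range H).foldl (fun r j =>
    if (ms.getD i 0).testBit j && !u.testBit j then
      (r + pvPureA ms n H (i+1) (u ||| (1 <<< j))) % pvMOD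
    else r) 0
termination_by n - i
decreasing_by all_goals omega

def pvInv (ms : List Nat) (n H : Nat) (memo : PySem.Dict (Nat × Nat) Int) : Prop :=
  ∀ i u v, memo.get? (i, u) = some v → v = pvPureA ms n H i u

-- ---------- generic list/fold lemmas ----------
theorem pv_sum_range (k : Nat) (f : Nat → Int) :
    ((List.range k).map f).sum = ∑ j ∈ Finset.range k, f j := rfl

theorem pv_foldl_ite_add (l : List Nat) (c : Nat → Prop) [DecidablePred c] (f : Nat → Int) (s0 : Int) :
    l.foldl (fun s j => if c j then s + f j else s) s0
      = s0 + (l.map (fun j => if c j then f j else 0)).sum := by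
  induction l generalizing s0 with
  | nil => simp
  | cons j l ih =>
    simp only [List.foldl_cons, List.map_cons, List.sum_cons]
    by_cases h : c j <;> simp [h, ih, add_assoc]

theorem pv_foldl_mod (l : List Nat) (c : Nat → Prop) [DecidablePred c] (g : Nat → Int) (r : Int) :
    l.foldl (fun s j => if c j then (s + g j % pvMOD) % pvMOD else s) (r % pvMOD)
      = (r + (l.map (fun j => if c j then g j else 0)).sum) % pvMOD := by
  induction l generalizing r with
  | nil => simp
  | cons j l ih =>
    simp only [List.foldl_cons, List.map_cons, List.sum_cons]
    by_cases h : c j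
    · rw [if_pos h, if_pos h]
      have : (r % pvMOD + g j % pvMOD) % pvMOD = (r + g j) % pvMOD := (Int.add_emod r (g j) pvMOD).symm
      rw [this, ih (r + g j), add_assoc]
    · rw [if_neg h, if_neg h, zero_add, ih r]

theorem pv_sum_mod (l : List Nat) (c : Nat → Prop) [DecidablePred c] (g : Nat → Int) :
    ((l.map (fun j => if c j then g j % pvMOD else 0)).sum) % pvMOD
      = ((l.map (fun j => if c j then g j else 0)).sum) % pvMOD := by
  induction l with
  | nil => rfl
  | cons j l ih =>
    simp only [List.map_cons, List.sum_cons]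
    by_cases h : c j
    · rw [if_pos h, if_pos h]
      rw [Int.add_emod (g j % pvMOD), Int.emod_emod_of_dvd _ dvd_rfl, ih, Int.add_emod (g j)]
    · rw [if_neg h, if_neg h, zero_add, zero_add, ih]

theorem pv_testBit_foldl (l : List Nat) (c : Nat → Bool) (f : Nat → Nat) (a0 t : Nat) :
    ((l.foldl (fun a x => if c x then a ||| 2 ^ (f x) else a) a0).testBit t)
      = (a0.testBit t || l.any (fun x => c x && (f x == t))) := by
  induction l generalizing a0 with
  | nil => simp
  | cons x l ih =>
    simp only [List.foldl_cons, List.any_cons]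
    by_cases h : c x
    · simp only [h, if_true, ih, Nat.testBit_or, Nat.testBit_two_pow, Bool.true_and]
      simp only [Bool.beq_eq_decide_eq]
      cases a0.testBit t <;> cases ht : (l.any fun x => c x && decide (f x = t)) <;>
        simp [eq_comm, Bool.or_comm]
    · simp only [h, Bool.false_eq_true, if_false, Bool.false_and, Bool.false_or, ih]

-- ---------- memoization is transparent ----------
theorem pvDpA_pure (ms : List Nat) (n H : Nat) :
    ∀ (fuel i u : Nat) (memo : PySem.Dict (Nat × Nat) Int), n - i ≤ fuel → pvInv ms n H memo →
      (pvDpA ms n H i u memo).1 = pvPureA ms n H i u ∧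
        pvInv ms n H (pvDpA ms n H i u memo).2 := by
  intro fuel
  induction fuel with
  | zero =>
    intro i u memo hfu hInv
    have hni : n ≤ i := by omega
    rw [pvDpA, pvPureA]
    simp only [hni, if_true]
    exact ⟨trivial, hInv⟩
  | succ fuel ih =>
    intro i u memo hfu hInv
    by_cases hni : n ≤ i
    · rw [pvDpA, pvPureA]
      simp only [hni, if_true]
      exact ⟨trivial, hInv⟩
    · have loop : ∀ (js : List Nat) (r : Int) (memo' : PySem.Dict (Nat × Nat) Int),
          pvInv ms n H memo' →
          ((js.foldl (fun (acc : Int × PySem.Dict (Nat × Nat) Int) j =>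
              if (ms.getD i 0).testBit j && !u.testBit j then
                ((acc.1 + (pvDpA ms n H (i+1) (u ||| (1 <<< j)) acc.2).1) % pvMOD,
                  (pvDpA ms n H (i+1) (u ||| (1 <<< j)) acc.2).2)
              else acc) (r, memo')).1
            = js.foldl (fun r j =>
                if (ms.getD i 0).testBit j && !u.testBit j then
                  (r + pvPureA ms n H (i+1) (u ||| (1 <<< j))) % pvMOD
                else r) r ∧
            pvInv ms n H ((js.foldl (fun (acc : Int × PySem.Dict (Nat × Nat) Int) j =>
              if (ms.getD i 0).testBit j && !u.testBit j then
                ((acc.1 + (pvDpA ms n H (i+1) (u ||| (1 <<< j)) acc.2).1) % pvMOD,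
                  (pvDpA ms n H (i+1) (u ||| (1 <<< j)) acc.2).2)
              else acc) (r, memo')).2)) := by
        intro js
        induction js with
        | nil => intro r memo' h; exact ⟨rfl, h⟩
        | cons j js ihl =>
          intro r memo' h
          simp only [List.foldl_cons]
          by_cases hc : (ms.getD i 0).testBit j && !u.testBit j
          · simp only [hc, if_true]
            obtain ⟨h1, h2⟩ := ih (i+1) (u ||| (1 <<< j)) memo' (by omega) h
            rw [h1]
            exact ihl ((r + pvPureA ms n H (i+1) (u ||| (1 <<< j))) % pvMOD)
              (pvDpA ms n H (i+1) (u ||| (1 <<< j)) memo').2 h2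
          · simp only [hc, if_false]
            exact ihl r memo' h
      rw [pvDpA]
      simp only [hni, if_false]
      cases hm : memo.get? (i, u) with
      | some v =>
        exact ⟨hInv i u v hm, hInv⟩
      | none =>
        rw [pvPureA]
        simp only [hni, if_false]
        obtain ⟨h1, h2⟩ := loop (List.range H) 0 memo hInv
        refine ⟨h1, ?_⟩
        intro i' u' v hv
        rw [PySem.Dict.get?_insert] at hv
        by_cases he : (i', u') = (i, u)
        · have e1 : i' = i := congrArg Prod.fst he
          have e2 : u' = u := congrArg Prod.snd he
          subst e1; subst e2
          rw [if_pos rfl] at hv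
          injection hv with hv
          rw [← hv, h1]
          conv_rhs => rw [pvPureA]
          simp only [hni, if_false]
        · rw [if_neg he] at hv
          exact h2 i' u' v hv

-- ---------- A's dp computes pvF mod pvMOD ----------
theorem pvPureA_eq_F (ms : List Nat) (n H : Nat) :
    ∀ (fuel i u : Nat), n - i ≤ fuel →
      pvPureA ms n H i u = ((pvF n H (pvR ms) i (2 ^ n - 1) u : Nat) : Int) % pvMOD := by
  intro fuel
  induction fuel with
  | zero =>
    intro i u hfu
    have hni : n ≤ i := by omega
    rw [pvPureA, pvF]
    simp only [hni, if_true]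
    norm_num [pvMOD]
  | succ fuel ih =>
    intro i u hfu
    by_cases hni : n ≤ i
    · rw [pvPureA, pvF]
      simp only [hni, if_true]
      norm_num [pvMOD]
    · rw [pvPureA, pvF]
      simp only [hni, if_false]
      have hbit : (2 ^ n - 1).testBit i = true := by
        rw [Nat.testBit_two_pow_sub_one]
        simp only [decide_eq_true_eq]
        omega
      rw [hbit]
      simp only [Bool.not_true, Bool.false_eq_true, if_false]
      have hcong : (List.range H).foldl (fun r j =>
          if (ms.getD i 0).testBit j && !u.testBit j then
            (r + pvPureA ms n H (i+1) (u ||| (1 <<< j))) % pvMOD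
          else r) 0
        = (List.range H).foldl (fun r j =>
          if (ms.getD i 0).testBit j && !u.testBit j then
            (r + ((pvF n H (pvR ms) (i+1) (2 ^ n - 1) (u ||| 2 ^ j) : Nat) : Int) % pvMOD) % pvMOD
          else r) 0 := by
        apply PySem.List.foldl_congr_mem
        intro acc j _
        split_ifs with hc
        · rw [ih (i+1) (u ||| (1 <<< j)) (by omega), Nat.one_shiftLeft]
        · rfl
      rw [hcong]
      have h0 : (0 : Int) = 0 % pvMOD := by norm_num [pvMOD]
      rw [h0, pv_foldl_mod, zero_add, pv_sum_range]
      rw [Nat.cast_sum]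
      congr 1
      apply Finset.sum_congr rfl
      intro j _
      unfold pvR
      split_ifs with h1
      · rfl
      · exact Nat.cast_zero.symm

-- ---------- structural facts about pvF ----------
theorem pvF_congr (n H : Nat) (R : Nat → Nat → Bool) :
    ∀ (fuel i m m' u : Nat), n - i ≤ fuel → (∀ k, i ≤ k → m.testBit k = m'.testBit k) →
      pvF n H R i m u = pvF n H R i m' u := by
  intro fuel
  induction fuel with
  | zero =>
    intro i m m' u hfu h
    have hni : n ≤ i := by omega
    conv_lhs => rw [pvF]
    conv_rhs => rw [pvF]
    simp only [hni, if_true]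
  | succ fuel ih =>
    intro i m m' u hfu h
    by_cases hni : n ≤ i
    · conv_lhs => rw [pvF]
      conv_rhs => rw [pvF]
      simp only [hni, if_true]
    · conv_lhs => rw [pvF]
      conv_rhs => rw [pvF]
      simp only [hni, if_false]
      rw [h i le_rfl]
      by_cases hb : m'.testBit i
      · simp only [hb, Bool.not_true, Bool.false_eq_true, if_false]
        apply Finset.sum_congr rfl
        intro j _
        split_ifs with hc
        · exact ih (i+1) m m' _ (by omega) (fun k hk => h k (by omega))
        · rfl
      · simp only [hb, Bool.not_false, if_true]
        exact ih (i+1) m m' u (by omega) (fun k hk => h k (by omega))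

theorem pvF_all_used (n H : Nat) (R : Nat → Nat → Bool) :
    ∀ (fuel i m u : Nat), n - i ≤ fuel → (∀ j, j < H → u.testBit j = true) →
      pvF n H R i m u = if ∀ k, i ≤ k → k < n → m.testBit k = false then 1 else 0 := by
  intro fuel
  induction fuel with
  | zero =>
    intro i m u hfu hu
    have hni : n ≤ i := by omega
    rw [pvF]
    simp only [hni, if_true]
    rw [if_pos]
    intro k hk1 hk2
    omega
  | succ fuel ih =>
    intro i m u hfu hu
    by_cases hni : n ≤ i
    · rw [pvF]
      simp only [hni, if_true]
      rw [if_pos]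
      intro k hk1 hk2
      omega
    · rw [pvF]
      simp only [hni, if_false]
      by_cases hb : m.testBit i
      · simp only [hb, Bool.not_true, Bool.false_eq_true, if_false]
        rw [if_neg]
        · apply Finset.sum_eq_zero
          intro j hj
          rw [if_neg]
          rw [hu j (Finset.mem_range.mp hj)]
          simp
        · intro hall
          have := hall i le_rfl (by omega)
          rw [hb] at this
          exact Bool.true_eq_false.mp this
      · simp only [hb, Bool.not_false, if_true]
        rw [ih (i+1) m u (by omega) hu]
        apply if_congr _ rfl rfl
        constructor
        · intro hall k hk1 hk2
          rcases Nat.eq_or_lt_of_le hk1 with rfl | hlt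
          · exact (Bool.not_eq_true _).mp (by simp [hb])
          · exact hall k (by omega) hk2
        · intro hall k hk1 hk2
          exact hall k (by omega) hk2

-- expansion of pvF by one hat j: either j stays unused, or some person k takes it
theorem pv_ite_sum (P : Prop) [Decidable P] (s : Finset Nat) (f : Nat → Nat) :
    (if P then ∑ y ∈ s, f y else 0) = ∑ y ∈ s, (if P then f y else 0) := by
  split_ifs
  · rfl
  · exact Finset.sum_const_zero.symm

theorem pv_ite_swap (P Q : Prop) [Decidable P] [Decidable Q] (x : Nat) :
    (if P then (if Q then x else 0) else 0) = (if Q then (if P then x else 0) else 0) := by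
  split_ifs <;> rfl

theorem pv_or_right_comm (x y z : Nat) : x ||| y ||| z = x ||| z ||| y := by
  rw [Nat.or_assoc, Nat.or_comm y z, ← Nat.or_assoc]

theorem pvF_hat (n H : Nat) (R : Nat → Nat → Bool) (j : Nat) (hj : j < H) :
    ∀ (fuel i m u : Nat), n - i ≤ fuel → u.testBit j = false →
      pvF n H R i m u = pvF n H R i m (u ||| 2 ^ j)
        + ∑ k ∈ Finset.Ico i n, if m.testBit k && R k j then pvF n H R i (m ^^^ 2 ^ k) (u ||| 2 ^ j) else 0 := by
  intro fuel
  induction fuel with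
  | zero =>
    intro i m u hfu hju
    have hni : n ≤ i := by omega
    conv_lhs => rw [pvF]
    conv_rhs => rw [pvF]
    rw [Finset.Ico_eq_empty (by omega), Finset.sum_empty]
    simp only [hni, if_true, add_zero]
  | succ fuel ih =>
    intro i m u hfu hju
    by_cases hni : n ≤ i
    · conv_lhs => rw [pvF]
      conv_rhs => rw [pvF]
      rw [Finset.Ico_eq_empty (by omega), Finset.sum_empty]
      simp only [hni, if_true, add_zero]
    · have hin : i < n := by omega
      have hjmem : j ∈ Finset.range H := Finset.mem_range.mpr hj
      have hu'j : (u ||| 2 ^ j).testBit j = true := by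
        simp [Nat.testBit_or, Nat.testBit_two_pow]
      have hu'ne : ∀ j', j' ≠ j → (u ||| 2 ^ j).testBit j' = u.testBit j' := by
        intro j' hne
        have hd : decide (j = j') = false := decide_eq_false (fun h => hne h.symm)
        simp [Nat.testBit_or, Nat.testBit_two_pow, hd]
      have hxbit : ∀ k k', k ≠ k' → (m ^^^ 2 ^ k).testBit k' = m.testBit k' := by
        intro k k' hne
        simp [Nat.testBit_xor, Nat.testBit_two_pow, hne]
      by_cases hb : m.testBit i
      case neg =>
        -- person i is not in the mask: both sides skip to i+1
        have e1 : pvF n H R i m (u ||| 2 ^ j) = pvF n H R (i+1) m (u ||| 2 ^ j) := by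
          conv_lhs => rw [pvF]
          simp only [hni, if_false, hb, Bool.not_false, if_true]
        have e2 : ∀ k, k ∈ Finset.Ico (i+1) n →
            (if m.testBit k && R k j then pvF n H R i (m ^^^ 2 ^ k) (u ||| 2 ^ j) else 0)
              = (if m.testBit k && R k j then pvF n H R (i+1) (m ^^^ 2 ^ k) (u ||| 2 ^ j) else 0) := by
          intro k hk
          have hki : k ≠ i := by have := Finset.mem_Ico.mp hk; omega
          split_ifs with hc
          · conv_lhs => rw [pvF]
            simp only [hni, if_false, hxbit k i hki, hb, Bool.not_false, if_true]
          · rfl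
        conv_lhs => rw [pvF]
        simp only [hni, if_false, hb, Bool.not_false, if_true]
        rw [ih (i+1) m u (by omega) hju, e1]
        rw [Finset.sum_eq_sum_Ico_succ_bot hin]
        rw [Finset.sum_congr rfl e2]
        have : (if m.testBit i && R i j then pvF n H R i (m ^^^ 2 ^ i) (u ||| 2 ^ j) else 0) = 0 := by
          rw [if_neg]
          simp [hb]
        omega
      case pos =>
        -- person i is in the mask
        set u' := u ||| 2 ^ j with hu'
        -- the j'-sum for a mask m₀ that still has bit i, over the available hats of u:
        have expand : ∀ m₀, m₀.testBit i = true →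
            pvF n H R i m₀ u' = ∑ j' ∈ (Finset.range H).erase j,
              (if R i j' && !u.testBit j' then pvF n H R (i+1) m₀ (u' ||| 2 ^ j') else 0) := by
          intro m₀ hm₀
          conv_lhs => rw [pvF]
          simp only [hni, if_false, hm₀, Bool.not_true, Bool.false_eq_true, if_false]
          rw [← Finset.sum_erase_add _ _ hjmem]
          have hterm : (if R i j && !u'.testBit j then pvF n H R (i+1) m₀ (u' ||| 2 ^ j) else 0) = 0 := by
            rw [if_neg]
            simp [hu'j]
          rw [hterm, add_zero]
          apply Finset.sum_congr rfl
          intro j' hj'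
          have hne : j' ≠ j := (Finset.mem_erase.mp hj').1
          rw [hu'ne j' hne]
        -- LHS: split off hat j, and expand every other hat j' by the new hat j (IH)
        have lhs_eq : pvF n H R i m u
            = (∑ j' ∈ (Finset.range H).erase j,
                (if R i j' && !u.testBit j' then pvF n H R (i+1) m (u' ||| 2 ^ j') else 0))
              + (∑ j' ∈ (Finset.range H).erase j,
                (if R i j' && !u.testBit j' then
                  ∑ k ∈ Finset.Ico (i+1) n,
                    (if m.testBit k && R k j then pvF n H R (i+1) (m ^^^ 2 ^ k) (u' ||| 2 ^ j') else 0)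
                 else 0))
              + (if R i j && !u.testBit j then pvF n H R (i+1) m u' else 0) := by
          conv_lhs => rw [pvF]
          simp only [hni, if_false, hb, Bool.not_true, Bool.false_eq_true, if_false]
          rw [← Finset.sum_erase_add _ _ hjmem]
          congr 1
          rw [← Finset.sum_add_distrib]
          apply Finset.sum_congr rfl
          intro j' hj'
          have hne : j' ≠ j := (Finset.mem_erase.mp hj').1
          split_ifs with hc
          · have hbit : (u ||| 2 ^ j').testBit j = false := by
              have : ¬ j' = j := hne
              simp [Nat.testBit_or, Nat.testBit_two_pow, hju, (fun h => hne h : ¬ j' = j)]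
            rw [ih (i+1) m (u ||| 2 ^ j') (by omega) hbit]
            rw [pv_or_right_comm u (2 ^ j') (2 ^ j)]
          · simp
        -- RHS pieces
        have rhs_sum : ∑ k ∈ Finset.Ico i n,
              (if m.testBit k && R k j then pvF n H R i (m ^^^ 2 ^ k) u' else 0)
            = (if m.testBit i && R i j then pvF n H R (i+1) m u' else 0)
              + (∑ j' ∈ (Finset.range H).erase j,
                (if R i j' && !u.testBit j' then
                  ∑ k ∈ Finset.Ico (i+1) n,
                    (if m.testBit k && R k j then pvF n H R (i+1) (m ^^^ 2 ^ k) (u' ||| 2 ^ j') else 0)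
                 else 0)) := by
          rw [Finset.sum_eq_sum_Ico_succ_bot hin]
          congr 1
          · -- the k = i term: person i takes hat j
            split_ifs with hc
            · have h1 : pvF n H R i (m ^^^ 2 ^ i) u' = pvF n H R (i+1) (m ^^^ 2 ^ i) u' := by
                conv_lhs => rw [pvF]
                have : (m ^^^ 2 ^ i).testBit i = false := by
                  simp [Nat.testBit_xor, Nat.testBit_two_pow, hb]
                simp only [hni, if_false, this, Bool.not_false, if_true]
              rw [h1]
              exact pvF_congr n H R (n - (i+1)) (i+1) (m ^^^ 2 ^ i) m u' le_rfl
                (fun k hk => hxbit i k (by omega))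
            · rfl
          · -- the k > i terms: expand each by the j'-sum and swap the two sums
            have e3 : ∀ k, k ∈ Finset.Ico (i+1) n →
                (if m.testBit k && R k j then pvF n H R i (m ^^^ 2 ^ k) u' else 0)
                  = (if m.testBit k && R k j then
                      ∑ j' ∈ (Finset.range H).erase j,
                        (if R i j' && !u.testBit j' then pvF n H R (i+1) (m ^^^ 2 ^ k) (u' ||| 2 ^ j') else 0)
                     else 0) := by
              intro k hk
              have hki : k ≠ i := by have := Finset.mem_Ico.mp hk; omega
              split_ifs with hc
              · exact expand (m ^^^ 2 ^ k) (by rw [hxbit k i (by omega)]; exact hb)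
              · rfl
            rw [Finset.sum_congr rfl e3]
            have e4 : ∀ k, k ∈ Finset.Ico (i+1) n →
                (if m.testBit k && R k j then
                    ∑ j' ∈ (Finset.range H).erase j,
                      (if R i j' && !u.testBit j' then pvF n H R (i+1) (m ^^^ 2 ^ k) (u' ||| 2 ^ j') else 0)
                  else 0)
                = ∑ j' ∈ (Finset.range H).erase j,
                    (if R i j' && !u.testBit j' then
                      (if m.testBit k && R k j then pvF n H R (i+1) (m ^^^ 2 ^ k) (u' ||| 2 ^ j') else 0)
                     else 0) := by
              intro k hk
              rw [pv_ite_sum]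
              exact Finset.sum_congr rfl (fun j' _ => pv_ite_swap _ _ _)
            rw [Finset.sum_congr rfl e4, Finset.sum_comm]
            exact Finset.sum_congr rfl (fun j' _ => (pv_ite_sum _ _ _).symm)
        rw [lhs_eq, expand m hb, rhs_sum]
        have hfj : (if R i j && !u.testBit j then pvF n H R (i+1) m u' else 0)
            = (if m.testBit i && R i j then pvF n H R (i+1) m u' else 0) := by
          simp only [hju, Bool.not_false, Bool.and_true, hb, Bool.true_and]
        omega

-- ---------- the bridge: B's recursion equals A's ----------
theorem pvCol_testBit (n : Nat) (R : Nat → Nat → Bool) (j t : Nat) :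
    (pvCol n R j).testBit t = (decide (t < n) && R t j) := by
  unfold pvCol
  rw [pv_testBit_foldl (f := fun i => i)]
  rw [Nat.zero_testBit, Bool.false_or]
  by_cases h1 : t < n
  · by_cases h2 : R t j = true
    · rw [List.any_eq_true.mpr ⟨t, List.mem_range.mpr h1, by simp [h2]⟩]
      simp [h1, h2]
    · rw [List.any_eq_false.mpr ?_]
      · simp [h2]
      · intro x hx
        by_cases hxt : x = t
        · subst hxt
          simp [h2]
        · simp [hxt]
  · rw [List.any_eq_false.mpr ?_]
    · simp [h1]
    · intro x hx
      have : x < n := List.mem_range.mp hx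
      have hxt : x ≠ t := by omega
      simp [hxt]

theorem pvM_eq_pvF (n H : Nat) (R : Nat → Nat → Bool) :
    ∀ (J : List Nat) (m u : Nat), J.Nodup → (∀ j ∈ J, j < H) →
      (∀ j, j < H → u.testBit j = !decide (j ∈ J)) → m < 2 ^ n →
      pvM n (J.map (pvCol n R)) m = pvF n H R 0 m u := by
  intro J
  induction J with
  | nil =>
    intro m u _ _ hu hm
    rw [List.map_nil]
    rw [pvF_all_used n H R n 0 m u (by omega)
      (fun j hj => by rw [hu j hj]; simp)]
    show (if m = 0 then 1 else 0) = _
    by_cases hm0 : m = 0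
    · rw [if_pos hm0, if_pos (fun k _ _ => by rw [hm0]; exact Nat.zero_testBit k)]
    · rw [if_neg hm0, if_neg]
      intro hall
      apply hm0
      apply Nat.eq_of_testBit_eq
      intro k
      rw [Nat.zero_testBit]
      by_cases hk : k < n
      · exact hall k (by omega) hk
      · exact Nat.testBit_eq_false_of_lt (lt_of_lt_of_le hm (Nat.pow_le_pow_right (by omega) (by omega)))
  | cons j J ih =>
    intro m u hnd hlt hu hm
    have hjH : j < H := hlt j (by simp)
    have hjnotJ : j ∉ J := (List.nodup_cons.mp hnd).1
    have hju : u.testBit j = false := by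
      rw [hu j hjH]
      simp
    have hu' : ∀ j', j' < H → (u ||| 2 ^ j).testBit j' = !decide (j' ∈ J) := by
      intro j' hj'
      rw [Nat.testBit_or, Nat.testBit_two_pow]
      by_cases he : j' = j
      · subst he
        simp [hjnotJ]
      · have hd : decide (j = j') = false := decide_eq_false (fun h => he h.symm)
        rw [hd, Bool.or_false, hu j' hj']
        have : decide (j' ∈ j :: J) = decide (j' ∈ J) := by simp [he]
        rw [this]
    rw [List.map_cons]
    show pvM n (List.map (pvCol n R) J) m + _ = _
    rw [pvF_hat n H R j hjH n 0 m u (by omega) hju]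
    rw [← Finset.range_eq_Ico]
    congr 1
    · exact ih m (u ||| 2 ^ j) (List.nodup_cons.mp hnd).2 (fun x hx => hlt x (by simp [hx])) hu' hm
    · apply Finset.sum_congr rfl
      intro i hi
      have hin : i < n := Finset.mem_range.mp hi
      rw [pvCol_testBit]
      rw [decide_eq_true hin, Bool.true_and]
      split_ifs with hc
      · exact ih (m ^^^ 2 ^ i) (u ||| 2 ^ j) (List.nodup_cons.mp hnd).2
          (fun x hx => hlt x (by simp [hx])) hu'
          (Nat.xor_lt_two_pow hm (Nat.pow_lt_pow_right (by omega) hin))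
      · rfl

-- ---------- B's dp sweep computes pvM mod pvMOD ----------
theorem pv_cond_testBit (m i : Nat) : ((m >>> i) &&& 1 = 1) ↔ m.testBit i = true := by
  rw [Nat.and_one_is_mod, Nat.testBit_eq_decide_div_mod_eq, Nat.shiftRight_eq_div_pow]
  simp

-- one sweep of B's hat loop (the body of the fold in the port of B)
def pvBStep (n : Nat) (dp : List Int) (pmask : Nat) : List Int :=
  (List.range (2 ^ n)).map (fun m =>
    (dp.getD m 0 + (List.range n).foldl (fun s i =>
        if (m >>> i) &&& 1 = 1 ∧ (pmask >>> i) &&& 1 = 1 then s + dp.getD (m ^^^ (1 <<< i)) 0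
        else s) 0) % pvMOD)

theorem pvBStep_length (n : Nat) (dp : List Int) (p : Nat) : (pvBStep n dp p).length = 2 ^ n := by
  simp [pvBStep]

theorem pvBStep_getD (n : Nat) (Q : List Nat) (dp : List Int) (p : Nat)
    (hdp : ∀ m, m < 2 ^ n → dp.getD m 0 = ((pvM n Q m : Nat) : Int) % pvMOD) :
    ∀ m, m < 2 ^ n → (pvBStep n dp p).getD m 0 = ((pvM n (p :: Q) m : Nat) : Int) % pvMOD := by
  intro m hm
  unfold pvBStep
  rw [List.getD_eq_getElem _ _ (by simpa using hm), List.getElem_map, List.getElem_range]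
  have hterm : ∀ i, i ∈ List.range n →
      ∀ (s : Int), (if (m >>> i) &&& 1 = 1 ∧ (p >>> i) &&& 1 = 1 then s + dp.getD (m ^^^ (1 <<< i)) 0 else s)
        = (if (m.testBit i && p.testBit i) = true then s + ((pvM n Q (m ^^^ 2 ^ i) : Nat) : Int) % pvMOD else s) := by
    intro i hi s
    have hin : i < n := List.mem_range.mp hi
    have hx : m ^^^ 2 ^ i < 2 ^ n :=
      Nat.xor_lt_two_pow hm (Nat.pow_lt_pow_right (by omega) hin)
    have hcond : ((m >>> i) &&& 1 = 1 ∧ (p >>> i) &&& 1 = 1) ↔ (m.testBit i && p.testBit i) = true := by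
      rw [pv_cond_testBit, pv_cond_testBit, Bool.and_eq_true]
    rw [Nat.one_shiftLeft, hdp (m ^^^ 2 ^ i) hx]
    exact if_congr hcond rfl rfl
  rw [PySem.List.foldl_congr_mem (List.range n) _ _ 0 (fun s i hi => hterm i hi s)]
  rw [hdp m hm]
  rw [pv_foldl_ite_add (List.range n) (fun i => (m.testBit i && p.testBit i) = true) _ 0, zero_add]
  rw [Int.add_emod, Int.emod_emod_of_dvd _ dvd_rfl, pv_sum_mod, ← Int.add_emod]
  show _ = ((pvM n (p :: Q) m : Nat) : Int) % pvMOD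
  have : pvM n (p :: Q) m
      = pvM n Q m + ∑ i ∈ Finset.range n, if m.testBit i && p.testBit i then pvM n Q (m ^^^ 2 ^ i) else 0 := rfl
  rw [this, Nat.cast_add, Nat.cast_sum, ← pv_sum_range]
  congr 2
  refine congrArg List.sum (List.map_congr_left ?_)
  intro i _
  split_ifs
  · rfl
  · exact Nat.cast_zero.symm

theorem pvDpB (n : Nat) :
    ∀ (V : List Nat) (Q : List Nat) (dp : List Int),
      dp.length = 2 ^ n →
      (∀ m, m < 2 ^ n → dp.getD m 0 = ((pvM n Q m : Nat) : Int) % pvMOD) →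
      (V.foldl (pvBStep n) dp).length = 2 ^ n ∧
        ∀ m, m < 2 ^ n →
          (V.foldl (pvBStep n) dp).getD m 0 = ((pvM n (V.reverse ++ Q) m : Nat) : Int) % pvMOD := by
  intro V
  induction V with
  | nil =>
    intro Q dp hlen hdp
    exact ⟨hlen, by simpa using hdp⟩
  | cons p V ih =>
    intro Q dp hlen hdp
    rw [List.foldl_cons]
    obtain ⟨h1, h2⟩ := ih (p :: Q) (pvBStep n dp p) (pvBStep_length n dp p) (pvBStep_getD n Q dp p hdp)
    refine ⟨h1, ?_⟩
    intro m hm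
    rw [h2 m hm]
    have : V.reverse ++ p :: Q = (p :: V).reverse ++ Q := by
      simp [List.reverse_cons, List.append_assoc]
    rw [this]

-- ---------- characterization of the ports' preprocessing ----------
theorem pv_testBit_shift {α : Type} (l : List α) (f : α → Nat) (a0 t : Nat) :
    ((l.foldl (fun a x => a ||| (1 <<< f x)) a0).testBit t)
      = (a0.testBit t || l.any (fun x => f x == t)) := by
  induction l generalizing a0 with
  | nil => simp
  | cons x l ih =>
    simp only [List.foldl_cons, List.any_cons]
    rw [ih, Nat.one_shiftLeft, Nat.testBit_or, Nat.testBit_two_pow]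
    simp only [Bool.beq_eq_decide_eq]
    cases a0.testBit t <;> cases ht : (l.any fun x => decide (f x = t)) <;>
      simp [eq_comm, Bool.or_comm]

-- the flattened double loop of B's wearers construction
def pvFlat (hats : List (List Int)) : List (Int × Int) :=
  (PySem.List.enumerate hats).flatMap (fun p => p.2.map (fun h => (p.1, h)))

def pvStep (w : PySem.Dict Int Nat) (q : Int × Int) : PySem.Dict Int Nat :=
  w.insert q.2 (w.getD q.2 0 ||| (1 <<< q.1.toNat))

def pvS (hats : List (List Int)) : List Int :=
  PySem.List.sorted (hats.foldl (fun s ph => PySem.Set.update s ph) PySem.Set.empty) (fun x => x) false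

def pvD (hats : List (List Int)) : PySem.Dict Int Int :=
  (PySem.List.enumerate (pvS hats)).foldl (fun d p => d.insert p.2 p.1) PySem.Dict.empty

def pvMs (hats : List (List Int)) : List Nat :=
  hats.map (fun ph => ph.foldl (fun mask hat => mask ||| (1 <<< (((pvD hats).getD hat 0)).toNat)) 0)

def pvW (hats : List (List Int)) : PySem.Dict Int Nat :=
  (pvFlat hats).foldl pvStep PySem.Dict.empty

theorem pvW_eq_port (hats : List (List Int)) :
    (PySem.List.enumerate hats).foldl (fun w p =>
        p.2.foldl (fun (w : PySem.Dict Int Nat) hat =>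
          w.insert hat (w.getD hat 0 ||| (1 <<< p.1.toNat))) w) PySem.Dict.empty
      = pvW hats := by
  unfold pvW pvFlat
  rw [List.foldl_flatMap]
  apply PySem.List.foldl_congr_mem
  intro acc p _
  rw [List.foldl_map]
  rfl

theorem pvFold_getD : ∀ (l : List (Int × Int)) (d : PySem.Dict Int Nat) (h : Int),
    (l.foldl pvStep d).getD h 0
      = (l.filter (fun q => q.2 == h)).foldl (fun a q => a ||| (1 <<< q.1.toNat)) (d.getD h 0) := by
  intro l
  induction l with
  | nil => intro d h; rfl
  | cons q l ih =>
    intro d h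
    rw [List.foldl_cons]
    by_cases hq : q.2 = h
    · rw [List.filter_cons_of_pos (by simpa using hq), List.foldl_cons, ih]
      subst hq
      congr 1
      unfold pvStep
      rw [PySem.Dict.getD_insert, if_pos rfl]
    · rw [List.filter_cons_of_neg (by simpa using hq), ih]
      congr 1
      unfold pvStep
      rw [PySem.Dict.getD_insert, if_neg (fun he => hq he.symm)]

theorem pvFold_keys : ∀ (l : List (Int × Int)) (d : PySem.Dict Int Nat),
    (l.foldl pvStep d).keys = PySem.Set.update d.keys (l.map (fun q => q.2)) := by
  intro l
  induction l with
  | nil => intro d; rfl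
  | cons q l ih =>
    intro d
    rw [List.foldl_cons, List.map_cons, PySem.Set.update_cons, ih]
    congr 1
    unfold pvStep
    by_cases hc : d.contains q.2
    · rw [PySem.Dict.keys_insert_of_contains d _ hc,
        PySem.Set.add_of_mem ((PySem.Dict.contains_iff_mem_keys d q.2).mp hc)]
    · rw [PySem.Dict.keys_insert_of_not_contains d _ (by simpa using hc),
        PySem.Set.add_of_not_mem (fun hmem => hc ((PySem.Dict.contains_iff_mem_keys d q.2).mpr hmem))]

theorem pvW_keys_nodup (hats : List (List Int)) : (pvW hats).keys.Nodup := by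
  rw [pvW, pvFold_keys]
  exact PySem.Set.nodup_update _ _ (by simp [PySem.Dict.empty])

theorem pv_values_eq (d : PySem.Dict Int Nat) (hnd : d.keys.Nodup) :
    d.values = d.keys.map (fun k => d.getD k 0) := by
  show d.items.map Prod.snd = (d.items.map Prod.fst).map (fun k => d.getD k 0)
  rw [List.map_map]
  apply List.map_congr_left
  intro p hp
  exact (PySem.Dict.getD_of_mem_items d (by simpa using hp) hnd 0).symm

theorem pvEnumFold_get? : ∀ (S : List Int), S.Nodup → ∀ (s : Int) (d : PySem.Dict Int Int) (h : Int),
    ((PySem.List.enumerate S s).foldl (fun d p => d.insert p.2 p.1) d).get? h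
      = if h ∈ S then some (s + (List.idxOf h S : Int)) else d.get? h := by
  intro S
  induction S with
  | nil => intro _ s d h; simp [PySem.List.enumerate]
  | cons x S ih =>
    intro hnd s d h
    rw [PySem.List.enumerate_cons, List.foldl_cons]
    rw [ih (List.nodup_cons.mp hnd).2 (s+1) (d.insert x s) h]
    by_cases hx : h = x
    · subst hx
      rw [if_neg (List.nodup_cons.mp hnd).1, if_pos (by simp), PySem.Dict.get?_insert_self,
        List.idxOf_cons_self]
      norm_num
    · by_cases hmem : h ∈ S
      · rw [if_pos hmem, if_pos (by simp [hmem]), List.idxOf_cons_ne S (fun he => hx he.symm)]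
        congr 1
        push_cast
        ring
      · rw [if_neg hmem, if_neg (by simp [hx, hmem]),
          PySem.Dict.get?_insert_of_ne d s hx]

theorem pv_allhats_mem : ∀ (hats : List (List Int)) (s : PySem.Set Int) (y : Int),
    (y ∈ hats.foldl (fun s ph => PySem.Set.update s ph) s) ↔ (y ∈ s ∨ ∃ ph ∈ hats, y ∈ ph) := by
  intro hats
  induction hats with
  | nil => intro s y; simp
  | cons ph hats ih =>
    intro s y
    rw [List.foldl_cons, ih, PySem.Set.mem_update]
    constructor
    · rintro ((h | h) | h)
      · exact Or.inl h
      · exact Or.inr ⟨ph, by simp, h⟩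
      · obtain ⟨q, hq, hy⟩ := h
        exact Or.inr ⟨q, by simp [hq], hy⟩
    · rintro (h | ⟨q, hq, hy⟩)
      · exact Or.inl (Or.inl h)
      · rcases List.mem_cons.mp hq with rfl | hq'
        · exact Or.inl (Or.inr hy)
        · exact Or.inr ⟨q, hq', hy⟩

theorem pv_allhats_nodup : ∀ (hats : List (List Int)) (s : PySem.Set Int), s.Nodup →
    (hats.foldl (fun s ph => PySem.Set.update s ph) s).Nodup := by
  intro hats
  induction hats with
  | nil => intro s h; exact h
  | cons ph hats ih =>
    intro s h
    exact ih _ (PySem.Set.nodup_update s ph h)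

theorem pvS_nodup (hats : List (List Int)) : (pvS hats).Nodup :=
  (PySem.List.sorted_perm _ _ _).nodup_iff.mpr (pv_allhats_nodup hats _ List.nodup_nil)

theorem pvS_mem (hats : List (List Int)) (y : Int) :
    y ∈ pvS hats ↔ ∃ ph ∈ hats, y ∈ ph := by
  rw [pvS, PySem.List.mem_sorted, pv_allhats_mem]
  simp [PySem.Set.empty]

theorem pvD_getD (hats : List (List Int)) (h : Int) (hmem : h ∈ pvS hats) :
    (pvD hats).getD h 0 = (List.idxOf h (pvS hats) : Int) := by
  rw [pvD, PySem.Dict.getD_eq_get?_getD,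
    pvEnumFold_get? (pvS hats) (pvS_nodup hats) 0 PySem.Dict.empty h, if_pos hmem]
  norm_num

theorem pv_getD_sub (hats : List (List Int)) (t : Nat) (hat : Int)
    (h : hat ∈ hats.getD t []) : hat ∈ pvS hats := by
  rw [pvS_mem]
  by_cases ht : t < hats.length
  · rw [List.getD_eq_getElem _ _ ht] at h
    exact ⟨hats[t], List.getElem_mem ht, h⟩
  · rw [List.getD_eq_default _ _ (by omega)] at h
    cases h

theorem pv_idxOf_inj (hats : List (List Int)) {h1 h2 : Int}
    (m1 : h1 ∈ pvS hats) (m2 : h2 ∈ pvS hats)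
    (he : List.idxOf h1 (pvS hats) = List.idxOf h2 (pvS hats)) : h1 = h2 := by
  have g1 := List.getElem_idxOf (List.idxOf_lt_length_of_mem m1)
  have g2 := List.getElem_idxOf (List.idxOf_lt_length_of_mem m2)
  rw [← g1, ← g2]
  congr 1

theorem pv_msbit (hats : List (List Int)) (i t : Nat) :
    (((pvMs hats).getD i 0).testBit t)
      = (decide (i < hats.length)
          && (hats.getD i []).any (fun hat => ((pvD hats).getD hat 0).toNat == t)) := by
  by_cases hi : i < hats.length
  · rw [pvMs, List.getD_eq_getElem _ _ (by simpa using hi), List.getElem_map,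
      pv_testBit_shift, Nat.zero_testBit, Bool.false_or, List.getD_eq_getElem _ _ hi,
      decide_eq_true hi, Bool.true_and]
  · rw [pvMs, List.getD_eq_default _ _ (by simpa using (by omega : hats.length ≤ i)),
      Nat.zero_testBit]
    simp [hi]

theorem pv_flat_mem (hats : List (List Int)) (x h : Int) :
    ((x, h) ∈ pvFlat hats) ↔ ∃ k : Nat, k < hats.length ∧ x = (k : Int) ∧ h ∈ hats.getD k [] := by
  rw [pvFlat, List.mem_flatMap]
  constructor
  · rintro ⟨p, hp, hmem⟩
    obtain ⟨k, hk, rfl⟩ := (PySem.List.mem_enumerate_iff hats 0 p).mp hp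
    obtain ⟨hh, hh1, hh2⟩ := List.mem_map.mp hmem
    have hy : hh = h := congrArg Prod.snd hh2
    refine ⟨k, hk, ?_, ?_⟩
    · have := congrArg Prod.fst hh2
      simpa using this.symm
    · simp only at hh1
      rw [hy] at hh1
      rwa [List.getD_eq_getElem _ _ hk]
  · rintro ⟨k, hk, rfl, hmem⟩
    refine ⟨((k : Int), hats[k]), ?_, ?_⟩
    · rw [PySem.List.mem_enumerate_iff]
      exact ⟨k, hk, by simp⟩
    · rw [List.getD_eq_getElem _ _ hk] at hmem
      exact List.mem_map.mpr ⟨h, hmem, rfl⟩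

theorem pv_Wbit (hats : List (List Int)) (h : Int) (t : Nat) :
    (((pvW hats).getD h 0).testBit t)
      = (decide (t < hats.length) && decide (h ∈ hats.getD t [])) := by
  rw [pvW, pvFold_getD, PySem.Dict.getD_empty, pv_testBit_shift, Nat.zero_testBit,
    Bool.false_or, List.any_filter]
  rw [Bool.eq_iff_iff]
  constructor
  · intro hx
    obtain ⟨q, hq, hqp⟩ := List.any_eq_true.mp hx
    have hqp' : q.2 = h ∧ q.1.toNat = t := by simpa using hqp
    obtain ⟨k, hk, hx1, hmem⟩ := (pv_flat_mem hats q.1 q.2).mp (by rwa [← Prod.mk.eta (p := q)] at hq)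
    have hq2' : q.1.toNat = t := hqp'.2
    rw [hx1, Int.toNat_natCast] at hq2'
    subst hq2'
    rw [hqp'.1, List.getD_eq_getElem _ _ hk] at hmem
    simp [hk, hmem]
  · intro hx
    have hx' : t < hats.length ∧ h ∈ hats.getD t [] := by simpa using hx
    obtain ⟨ht', hmem'⟩ := hx'
    apply List.any_eq_true.mpr
    refine ⟨((t : Int), h), (pv_flat_mem hats _ _).mpr ⟨t, ht', rfl, hmem'⟩, ?_⟩
    simp

theorem pv_keysW (hats : List (List Int)) (h : Int) :
    h ∈ (pvW hats).keys ↔ h ∈ pvS hats := by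
  rw [pvW, pvFold_keys]
  show h ∈ PySem.Set.update (PySem.Dict.keys PySem.Dict.empty) _ ↔ _
  rw [PySem.Set.mem_update, pvS_mem]
  constructor
  · rintro (hk | hk)
    · simp [PySem.Dict.empty] at hk
    · obtain ⟨q, hq, rfl⟩ := List.mem_map.mp hk
      obtain ⟨k, hk', _, hmem⟩ := (pv_flat_mem hats q.1 q.2).mp (by rwa [← Prod.mk.eta (p := q)] at hq)
      rw [List.getD_eq_getElem _ _ hk'] at hmem
      exact ⟨hats[k], List.getElem_mem hk', hmem⟩
  · rintro ⟨ph, hph, hmem⟩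
    obtain ⟨k, hk, rfl⟩ := List.mem_iff_getElem.mp hph
    refine Or.inr (List.mem_map.mpr ⟨((k : Int), h), ?_, rfl⟩)
    exact (pv_flat_mem hats _ _).mpr ⟨k, hk, rfl, by rwa [List.getD_eq_getElem _ _ hk]⟩

theorem pv_any_decide (hats : List (List Int)) (h : Int) (hS : h ∈ pvS hats) (t : Nat) :
    ((hats.getD t []).any (fun hat => ((pvD hats).getD hat 0).toNat == List.idxOf h (pvS hats)))
      = decide (h ∈ hats.getD t []) := by
  rw [Bool.eq_iff_iff]
  constructor
  · intro hx
    obtain ⟨hat, hmem, heq⟩ := List.any_eq_true.mp hx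
    have hhat : hat ∈ pvS hats := pv_getD_sub hats t hat hmem
    rw [pvD_getD hats hat hhat, Int.toNat_natCast] at heq
    have := pv_idxOf_inj hats hhat hS (by simpa using heq)
    rw [← this]
    simpa using hmem
  · intro hx
    refine List.any_eq_true.mpr ⟨h, of_decide_eq_true hx, ?_⟩
    rw [pvD_getD hats h hS, Int.toNat_natCast]
    simp

theorem pv_pmask (hats : List (List Int)) (h : Int) (hS : h ∈ pvS hats) :
    (pvW hats).getD h 0
      = pvCol hats.length (pvR (pvMs hats)) (List.idxOf h (pvS hats)) := by
  apply Nat.eq_of_testBit_eq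
  intro t
  rw [pv_Wbit, pvCol_testBit]
  unfold pvR
  rw [pv_msbit, pv_any_decide hats h hS t]
  cases hd : decide (t < hats.length) <;> simp

theorem pv_main (hats : List (List Int)) :
    number_of_ways_to_wear_hats_hat_bitmask hats = number_of_ways_to_wear_hats_hat_bitmask_alt hats := by
  have hA : number_of_ways_to_wear_hats_hat_bitmask hats
      = (pvDpA (pvMs hats) hats.length (pvS hats).length 0 0 PySem.Dict.empty).1 := rfl
  have hInv0 : pvInv (pvMs hats) hats.length (pvS hats).length PySem.Dict.empty := by
    intro i u v hv
    rw [PySem.Dict.get?_empty] at hv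
    cases hv
  have hA2 := (pvDpA_pure (pvMs hats) hats.length (pvS hats).length hats.length 0 0
    PySem.Dict.empty (by omega) hInv0).1
  have hA3 := pvPureA_eq_F (pvMs hats) hats.length (pvS hats).length hats.length 0 0 (by omega)
  -- B side
  have hB : number_of_ways_to_wear_hats_hat_bitmask_alt hats
      = PySem.List.pyGetD (((pvW hats).values).foldl (pvBStep hats.length)
          (1 :: List.replicate (2 ^ hats.length - 1) 0)) (-1) 0 := by
    simp only [number_of_ways_to_wear_hats_hat_bitmask_alt]
    rw [pvW_eq_port]
    rfl
  have hdp0len : (1 :: List.replicate (2 ^ hats.length - 1) 0 : List Int).length = 2 ^ hats.length := by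
    have := Nat.two_pow_pos hats.length
    simp only [List.length_cons, List.length_replicate]
    omega
  have hdp0 : ∀ m, m < 2 ^ hats.length →
      (1 :: List.replicate (2 ^ hats.length - 1) 0 : List Int).getD m 0
        = ((pvM hats.length [] m : Nat) : Int) % pvMOD := by
    intro m hm
    cases m with
    | zero =>
      show (1 : Int) = ((1 : Nat) : Int) % pvMOD
      norm_num [pvMOD]
    | succ m =>
      show (List.replicate (2 ^ hats.length - 1) (0 : Int)).getD m 0 = ((pvM hats.length [] (m+1) : Nat) : Int) % pvMOD
      rw [List.getD_replicate _ (by omega)]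
      show (0 : Int) = ((if m + 1 = 0 then 1 else 0 : Nat) : Int) % pvMOD
      norm_num
  obtain ⟨hlen, hval⟩ := pvDpB hats.length ((pvW hats).values) []
    (1 :: List.replicate (2 ^ hats.length - 1) 0) hdp0len hdp0
  have hne : ((pvW hats).values).foldl (pvBStep hats.length)
      (1 :: List.replicate (2 ^ hats.length - 1) 0) ≠ [] :=
    List.ne_nil_of_length_pos (by rw [hlen]; exact Nat.two_pow_pos _)
  rw [hA, hA2, hA3, hB, PySem.List.pyGetD_neg_one _ _ hne, List.getLast_eq_getElem,
    ← List.getD_eq_getElem _ 0 (by rw [hlen]; exact Nat.sub_lt (Nat.two_pow_pos _) Nat.one_pos), hlen,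
    hval (2 ^ hats.length - 1) (by have := Nat.two_pow_pos hats.length; omega),
    List.append_nil]
  -- the list of people-masks that B processes is J.map pvCol for an enumeration J of all hat ids
  have hVrev : ((pvW hats).values).reverse
      = (((pvW hats).keys.map (fun h => List.idxOf h (pvS hats))).reverse).map
          (pvCol hats.length (pvR (pvMs hats))) := by
    rw [pv_values_eq _ (pvW_keys_nodup hats)]
    rw [List.map_congr_left (fun h hm => pv_pmask hats h ((pv_keysW hats h).mp hm))]
    rw [← List.map_reverse, ← List.map_reverse, List.map_map]
    rfl
  rw [hVrev, pvM_eq_pvF hats.length (pvS hats).length (pvR (pvMs hats)) _ _ 0]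
  · rw [List.nodup_reverse]
    apply List.Nodup.map_on
    · intro x hx y hy he
      exact pv_idxOf_inj hats ((pv_keysW hats x).mp hx) ((pv_keysW hats y).mp hy) he
    · exact pvW_keys_nodup hats
  · intro j hj
    rw [List.mem_reverse] at hj
    obtain ⟨h, hm, rfl⟩ := List.mem_map.mp hj
    exact List.idxOf_lt_length_of_mem ((pv_keysW hats h).mp hm)
  · intro j hj
    rw [Nat.zero_testBit]
    have hjmem : j ∈ ((pvW hats).keys.map (fun h => List.idxOf h (pvS hats))).reverse := by
      rw [List.mem_reverse]
      refine List.mem_map.mpr ⟨(pvS hats)[j], ?_, ?_⟩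
      · exact (pv_keysW hats _).mpr (List.getElem_mem hj)
      · exact (pvS_nodup hats).idxOf_getElem j hj
    rw [decide_eq_true hjmem]
    rfl
  · have := Nat.two_pow_pos hats.length
    omega

-- ===== VERDICT (by name: the statement is the Claim_ definition above) =====
theorem number_of_ways_to_wear_hats_hat_bitmask_spec : Claim_equal_number_of_ways_to_wear_hats_hat_bitmask := by
  intro hats _
  unfold Spec_number_of_ways_to_wear_hats_hat_bitmask
  exact pv_main hats
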